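-- pv_equiv track=rewrite | github.com/user-is-absinthe/screen_flask | external_modules.py | dist_docs
-- ===== SOURCE A (Python) =====
-- def dist_docs(doc_list, user_id_list):
--     doc2user = []
--     i = 0
--     max_i = len(user_id_list)
--     for d in doc_list:
--         u = user_id_list[i]
--         temp = (d, u)
--         doc2user.append(temp)
--         i = i+1
--         if i == max_i:
--             i = 0
--         u = user_id_list[i]
--         temp = (d, u)
--         doc2user.append(temp)
--     return doc2user
-- ===== SOURCE B (Python) =====
-- def dist_docs(doc_list, user_id_list):
--     n = len(user_id_list)
--     # stage 1: materialise the cyclic user stream long enough to cover every doc plus one lookahead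
--     stream = user_id_list * (len(doc_list) // n + 1) if n else []
--     # stage 2: zip each doc with the stream and its one-step shift
--     out = []
--     for d, u, v in zip(doc_list, stream, stream[1:]):
--         out.append((d, u))
--         out.append((d, v))
--     return out
-- ===== Notes on version B (the rewrite author's own statement) =====
-- stated objective: alternative
-- what changed: Replaces A's per-element wrapping index counter by a staged pipeline: first materialise the cyclic user stream (list repetition), then zip the docs with that stream and its one-step shift, so no index arithmetic or reset branch remains.
-- outside the precondition, e.g. on dist_docs([1], []): A raises IndexError, B returns []
import Mathlib
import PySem

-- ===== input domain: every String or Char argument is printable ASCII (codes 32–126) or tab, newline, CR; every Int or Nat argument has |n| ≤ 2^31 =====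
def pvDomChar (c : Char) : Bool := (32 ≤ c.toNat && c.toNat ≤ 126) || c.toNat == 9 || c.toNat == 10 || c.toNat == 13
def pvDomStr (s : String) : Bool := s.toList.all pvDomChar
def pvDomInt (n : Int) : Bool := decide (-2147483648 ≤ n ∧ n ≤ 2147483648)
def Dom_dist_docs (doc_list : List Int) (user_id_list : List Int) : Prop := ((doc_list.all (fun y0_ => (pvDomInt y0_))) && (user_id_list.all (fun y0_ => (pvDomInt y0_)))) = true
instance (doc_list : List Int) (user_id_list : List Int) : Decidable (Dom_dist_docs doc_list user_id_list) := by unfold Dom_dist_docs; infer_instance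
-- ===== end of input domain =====

-- B replaces A's wrapping index counter by a staged pipeline: materialise the cyclic user
-- stream once, then zip docs with the stream and its one-step shift (objective: alternative).

-- ===== PORT A =====
-- loop state: (doc2user so far, i); pyGetD is exact under Pre_ (index always in range there)
def dist_docs (doc_list : List Int) (user_id_list : List Int) : List (Int × Int) :=
  (doc_list.foldl (fun (st : List (Int × Int) × Int) d =>
    let u := PySem.List.pyGetD user_id_list st.2 0
    let acc := st.1 ++ [(d, u)]
    let i := st.2 + 1
    let i := if i = (user_id_list.length : Int) then 0 else i
    let u2 := PySem.List.pyGetD user_id_list i 0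
    (acc ++ [(d, u2)], i)) (([] : List (Int × Int)), (0 : Int))).1

-- ===== PORT B =====
-- 'user_id_list * k' for k ≥ 0 is exactly flatten (replicate k user_id_list);
-- 'stream[1:]' on a list is exactly stream.drop 1; zip of three = zip with nested zip.
def dist_docs_alt (doc_list : List Int) (user_id_list : List Int) : List (Int × Int) :=
  let n := user_id_list.length
  let stream := if n ≠ 0 then (List.replicate (doc_list.length / n + 1) user_id_list).flatten
                else []
  (doc_list.zip (stream.zip (stream.drop 1))).foldl
    (fun out p => (out ++ [(p.1, p.2.1)]) ++ [(p.1, p.2.2)]) []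

-- ===== PRECONDITION & SPEC =====
-- Pre_ excludes only a non-empty doc_list with an empty user_id_list, where the Python A
-- raises IndexError (and B returns []).
def Pre_dist_docs (doc_list : List Int) (user_id_list : List Int) : Prop :=
  user_id_list ≠ [] ∨ doc_list = []
instance (doc_list : List Int) (user_id_list : List Int) : Decidable (Pre_dist_docs doc_list user_id_list) := by unfold Pre_dist_docs; infer_instance
def pvWitness_dist_docs : List Int × List Int := ([10, 20, 30], [1, 2])

def Spec_dist_docs (doc_list : List Int) (user_id_list : List Int) (out : List (Int × Int)) : Prop := out = dist_docs_alt doc_list user_id_list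
instance (doc_list : List Int) (user_id_list : List Int) (out : List (Int × Int)) : Decidable (Spec_dist_docs doc_list user_id_list out) := by unfold Spec_dist_docs; infer_instance

-- ===== CLAIM (what is proved, stated in full; the proofs are below) =====
def Claim_equal_dist_docs : Prop := ∀ (doc_list : List Int) (user_id_list : List Int), Dom_dist_docs doc_list user_id_list → Pre_dist_docs doc_list user_id_list → Spec_dist_docs doc_list user_id_list (dist_docs doc_list user_id_list)

-- ===== LEMMAS AND PROOFS =====

-- an element of the repeated list is the corresponding element of the list, cyclically
theorem pv_flatten_replicate_getElem? (xs : List Int) (c j : Nat) (hj : j < c * xs.length) :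
    ((List.replicate c xs).flatten)[j]? = xs[j % xs.length]? := by
  induction c generalizing j with
  | zero => omega
  | succ c ih =>
      simp only [List.replicate_succ, List.flatten_cons]
      by_cases h : j < xs.length
      · rw [List.getElem?_append_left h, Nat.mod_eq_of_lt h]
      · have hx : xs.length ≤ j := by omega
        rw [List.getElem?_append_right hx]
        have hmm : (j - xs.length) % xs.length = j % xs.length := by
          conv_rhs => rw [show j = xs.length + (j - xs.length) by omega]
          rw [Nat.add_mod_left]
        rw [← hmm]
        exact ih (j - xs.length) (by rw [Nat.succ_mul] at hj; omega)

-- A's loop with wrapping counter i versus B's zip consuming a stream whose j-th element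
-- is users[(i+j) % n]  (the fold function is A's loop body, zeta-reduced)
theorem pv_loop (users : List Int) (hn : users ≠ []) :
    ∀ (docs : List Int) (i : Nat), i < users.length →
    ∀ (s : List Int) (acc : List (Int × Int)),
    (∀ j, j ≤ docs.length → s[j]? = users[(i + j) % users.length]?) →
    (docs.foldl (fun (st : List (Int × Int) × Int) d =>
        (st.1 ++ [(d, PySem.List.pyGetD users st.2 0)] ++
           [(d, PySem.List.pyGetD users (if st.2 + 1 = (users.length : Int) then 0 else st.2 + 1) 0)],
         if st.2 + 1 = (users.length : Int) then 0 else st.2 + 1)) (acc, (i : Int))).1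
      = acc ++ (docs.zip (s.zip (s.drop 1))).flatMap
          (fun p => [(p.1, p.2.1), (p.1, p.2.2)]) := by
  intro docs
  induction docs with
  | nil => intro i hi s acc hs; simp
  | cons d ds ih =>
      intro i hi s acc hs
      have hnpos : 0 < users.length := List.length_pos_of_ne_nil hn
      have hmod : (i + 1) % users.length < users.length := Nat.mod_lt _ hnpos
      obtain ⟨u, v, t, rfl⟩ : ∃ u v t, s = u :: v :: t := by
        have h1 := hs 1 (by simp)
        rw [List.getElem?_eq_getElem hmod] at h1
        match s, h1 with
        | [], h1 => simp at h1
        | [u], h1 => simp at h1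
        | u :: v :: t, _ => exact ⟨u, v, t, rfl⟩
      have hu : u = users[i] := by
        have h0 := hs 0 (by simp)
        rw [Nat.add_zero, Nat.mod_eq_of_lt hi, List.getElem?_eq_getElem hi] at h0
        simpa using h0
      have hv : v = users[(i + 1) % users.length] := by
        have h1 := hs 1 (by simp)
        rw [List.getElem?_eq_getElem hmod] at h1
        simpa using h1
      have hgu : PySem.List.pyGetD users (i : Int) 0 = users[i] := by
        rw [PySem.List.pyGetD_natCast]
        exact List.getD_eq_getElem users 0 hi
      have hstep : (if (i : Int) + 1 = (users.length : Int) then 0 else (i : Int) + 1)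
          = (((i + 1) % users.length : Nat) : Int) := by
        by_cases h : i + 1 = users.length
        · rw [if_pos (by exact_mod_cast h), h, Nat.mod_self, Nat.cast_zero]
        · rw [if_neg (by intro hh; exact h (by exact_mod_cast hh)),
            Nat.mod_eq_of_lt (by omega)]
          push_cast; ring
      have hgu2 : PySem.List.pyGetD users (((i + 1) % users.length : Nat) : Int) 0
          = users[(i + 1) % users.length] := by
        rw [PySem.List.pyGetD_natCast]
        exact List.getD_eq_getElem users 0 hmod
      have hs' : ∀ j, j ≤ ds.length →
          (v :: t)[j]? = users[((i + 1) % users.length + j) % users.length]? := by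
        intro j hj
        have h := hs (j + 1) (by simp; omega)
        rw [Nat.mod_add_mod]
        simpa [show i + (j + 1) = i + 1 + j by ring] using h
      simp only [List.foldl_cons, List.drop_succ_cons, List.drop_zero, List.zip_cons_cons,
        List.flatMap_cons]
      rw [hstep, hgu, hgu2]
      rw [ih ((i + 1) % users.length) hmod (v :: t)
        (acc ++ [(d, users[i])] ++ [(d, users[(i + 1) % users.length])]) hs']
      simp [hu, hv]

-- ===== VERDICT (by name: the statements are the Claim_ definitions above) =====
theorem dist_docs_spec : Claim_equal_dist_docs := by
  intro doc_list users _ hpre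
  unfold Spec_dist_docs
  rcases hpre with hu | hd
  · have hnpos : 0 < users.length := List.length_pos_of_ne_nil hu
    have hs : ∀ j, j ≤ doc_list.length →
        ((List.replicate (doc_list.length / users.length + 1) users).flatten)[j]?
          = users[(0 + j) % users.length]? := by
      intro j hj
      rw [Nat.zero_add]
      apply pv_flatten_replicate_getElem?
      have h1 := Nat.div_add_mod doc_list.length users.length
      have h2 := Nat.mod_lt doc_list.length hnpos
      have h3 : (doc_list.length / users.length + 1) * users.length
          = users.length * (doc_list.length / users.length) + users.length := by ring
      omega
    have hmain := pv_loop users hu doc_list 0 hnpos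
      ((List.replicate (doc_list.length / users.length + 1) users).flatten) [] hs
    simp only [Nat.cast_zero, List.nil_append] at hmain
    have hB : (doc_list.zip
          (((List.replicate (doc_list.length / users.length + 1) users).flatten).zip
            (((List.replicate (doc_list.length / users.length + 1) users).flatten).drop 1))).foldl
          (fun out p => (out ++ [(p.1, p.2.1)]) ++ [(p.1, p.2.2)]) ([] : List (Int × Int))
        = (doc_list.zip
          (((List.replicate (doc_list.length / users.length + 1) users).flatten).zip
            (((List.replicate (doc_list.length / users.length + 1) users).flatten).drop 1))).flatMap
          (fun p => [(p.1, p.2.1), (p.1, p.2.2)]) := by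
      rw [show (fun (out : List (Int × Int)) (p : Int × Int × Int) =>
          (out ++ [(p.1, p.2.1)]) ++ [(p.1, p.2.2)])
          = (fun (out : List (Int × Int)) (p : Int × Int × Int) =>
          out ++ [(p.1, p.2.1), (p.1, p.2.2)]) from
        funext fun o => funext fun p => by simp]
      simp [List.flatMap_def]
    show dist_docs doc_list users = dist_docs_alt doc_list users
    unfold dist_docs_alt
    simp only [if_pos (show users.length ≠ 0 by omega)]
    exact hmain.trans hB.symm
  · subst hd; rfl
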